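-- pv_equiv track=rewrite | github.com/gadkarigaurav5/csc766-course-project | tests/sample.py | pipeline_step_4
-- ===== SOURCE A (Python) =====
-- def pipeline_step_4(data):
--     output = {}
--     for item in data:
--         key = item % 5
--         if key not in output:
--             output[key] = []
--         output[key].append(item)
--     return output
-- ===== SOURCE B (Python) =====
-- def pipeline_step_4(data):
--     keys = dict.fromkeys(item % 5 for item in data)
--     return {k: [x for x in data if x % 5 == k] for k in keys}
-- ===== Notes on version B (the rewrite author's own statement) =====
-- stated objective: alternative
-- what changed: Single-pass dict-append grouping replaced by computing the distinct keys first (dict.fromkeys, first-appearance order) and building each bucket by a per-key filter over the whole input.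
import Mathlib
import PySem

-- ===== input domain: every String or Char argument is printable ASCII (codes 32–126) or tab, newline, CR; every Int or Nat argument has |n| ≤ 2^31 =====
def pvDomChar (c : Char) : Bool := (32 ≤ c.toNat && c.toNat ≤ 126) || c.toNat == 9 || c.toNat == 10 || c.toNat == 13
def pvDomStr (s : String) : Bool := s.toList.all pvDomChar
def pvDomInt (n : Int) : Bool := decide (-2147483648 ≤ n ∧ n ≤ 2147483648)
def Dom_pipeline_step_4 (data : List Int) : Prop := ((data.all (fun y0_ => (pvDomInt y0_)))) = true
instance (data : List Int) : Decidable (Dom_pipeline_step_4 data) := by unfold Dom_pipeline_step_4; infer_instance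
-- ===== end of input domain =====

-- B computes the distinct keys first, then builds each bucket by filtering the whole input; alternative decomposition, not faster.
-- ===== PORT A =====
-- for item in data: key = item % 5; if key not in output: output[key] = []; output[key].append(item)
def pipeline_step_4 (data : List Int) : List (Int × List Int) :=
  (data.foldl
    (fun output item =>
      let key := PySem.Int.mod item 5
      let output := if output.contains key then output else output.insert key []
      -- output[key].append(item): in-place append = output[key] = output.get(key, []) ++ [item]
      output.modify key [] (fun v => v ++ [item]))
    PySem.Dict.empty).items

-- ===== PORT B =====
-- keys = dict.fromkeys(item % 5 for item in data)  (distinct keys, first-appearance order)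
-- {k: [x for x in data if x % 5 == k] for k in keys}
def pipeline_step_4_alt (data : List Int) : List (Int × List Int) :=
  let keys := PySem.Set.ofList (data.map (fun item => PySem.Int.mod item 5))
  keys.map (fun k => (k, data.filter (fun x => PySem.Int.mod x 5 == k)))

-- ===== PRECONDITION & SPEC =====
def Spec_pipeline_step_4 (data : List Int) (out : List (Int × List Int)) : Prop := out = pipeline_step_4_alt data
instance (data : List Int) (out : List (Int × List Int)) : Decidable (Spec_pipeline_step_4 data out) := by unfold Spec_pipeline_step_4; infer_instance

-- ===== CLAIM (what is proved, stated in full; the proofs are below) =====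
def Claim_equal_pipeline_step_4 : Prop := ∀ (data : List Int), Dom_pipeline_step_4 data → Spec_pipeline_step_4 data (pipeline_step_4 data)

-- ===== LEMMAS AND PROOFS =====

theorem step_eq_modify (d : PySem.Dict Int (List Int)) (k : Int) (x : Int) :
    ((if d.contains k then d else d.insert k []).modify k [] (fun v => v ++ [x]))
      = d.modify k [] (fun v => v ++ [x]) := by
  by_cases h : d.contains k = true
  · simp [h]
  · simp only [Bool.not_eq_true] at h
    simp only [h, Bool.false_eq_true, if_false]
    apply PySem.Dict.ext
    simp [PySem.Dict.modify, PySem.Dict.insert_insert_self,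
      PySem.Dict.getD_of_not_contains (h := h)]

theorem fold_eq (data : List Int) (d : PySem.Dict Int (List Int)) :
    data.foldl
      (fun output item =>
        let key := PySem.Int.mod item 5
        let output := if output.contains key then output else output.insert key []
        output.modify key [] (fun v => v ++ [item])) d
    = data.foldl (fun d x => d.modify (PySem.Int.mod x 5) [] (fun v => v ++ [x])) d := by
  induction data generalizing d with
  | nil => rfl
  | cons x xs ih => simp only [List.foldl_cons, step_eq_modify]

theorem ports_agree (data : List Int) :
    pipeline_step_4 data = pipeline_step_4_alt data := by
  show (data.foldl
      (fun output item =>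
        let key := PySem.Int.mod item 5
        let output := if output.contains key then output else output.insert key []
        output.modify key [] (fun v => v ++ [item])) PySem.Dict.empty).items
    = (PySem.Set.ofList (data.map (fun item => PySem.Int.mod item 5))).map
        (fun k => (k, data.filter (fun x => PySem.Int.mod x 5 == k)))
  rw [fold_eq]
  have hpair : data.foldl (fun d x => d.modify (PySem.Int.mod x 5) [] (fun v => v ++ [x]))
      PySem.Dict.empty
      = (data.map (fun x => ((PySem.Int.mod x 5 : Int), x))).foldl
          (fun d p => d.modify p.1 [] (fun v => v ++ [p.2])) PySem.Dict.empty := by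
    rw [List.foldl_map]
  rw [hpair]
  set l := data.map (fun x => ((PySem.Int.mod x 5 : Int), x)) with hl
  set D := l.foldl (fun d p => d.modify p.1 [] (fun v => v ++ [p.2])) PySem.Dict.empty with hD
  have hnd : D.keys.Nodup := by
    rw [hD]
    exact PySem.Dict.nodup_keys_foldl_modify_key l (·.1) [] (fun d p => fun v => v ++ [p.2])
      PySem.Dict.empty (by simp [PySem.Dict.keys_empty])
  rw [PySem.Dict.items_eq_map_keys D hnd []]
  have hkeys : D.keys = PySem.Set.ofList (data.map (fun item => PySem.Int.mod item 5)) := by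
    rw [hD]
    rw [PySem.Dict.keys_foldl_modify_key]
    simp [PySem.Dict.keys_empty, PySem.Set.update_nil_left, hl, List.map_map, Function.comp_def]
  rw [hkeys]
  apply List.map_congr_left
  intro k hk
  have hget : D.getD k [] = (l.filter (fun p => p.1 == k)).map (·.2) := by
    rw [hD, PySem.Dict.getD_foldl_modify_append]
    simp [PySem.Dict.getD_empty]
  rw [hget, hl]
  simp [List.filter_map, List.map_map, Function.comp_def]

-- ===== VERDICT (by name: the statement is the Claim_ definition above) =====
theorem pipeline_step_4_spec : Claim_equal_pipeline_step_4 := by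
  intro data _
  exact ports_agree data
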